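-- pv_equiv track=rewrite | github.com/vlongle/diffPhys3d | vlm_labeler.py | analyze_vlm_results
-- ===== SOURCE A (Python) =====
-- def analyze_vlm_results(results):
--     """
--     Analyze the results from the VLM processing.
--
--     Args:
--         results (dict): Dictionary with object IDs and their appropriateness status
--
--     Returns:
--         tuple: (total_objects, appropriate_objects, inappropriate_objects, stats_by_category)
--     """
--     total_objects = len(results)
--     appropriate_objects = sum(1 for result in results.values() if result.get("is_appropriate", False))
--     inappropriate_objects = total_objects - appropriate_objects
--
--     # Analyze by category
--     stats_by_category = {}
--     for obj_id, result in results.items():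
--         category = obj_id.split('/')[0]
--         if category not in stats_by_category:
--             stats_by_category[category] = {
--                 "total": 0,
--                 "appropriate": 0,
--                 "inappropriate": 0
--             }
--
--         stats_by_category[category]["total"] += 1
--         if result.get("is_appropriate", False):
--             stats_by_category[category]["appropriate"] += 1
--         else:
--             stats_by_category[category]["inappropriate"] += 1
--
--     return total_objects, appropriate_objects, inappropriate_objects, stats_by_category
-- ===== SOURCE B (Python) =====
-- def analyze_vlm_results(results):
--     # Staged group-by-scan: collect the categories in first-seen order, then count each
--     # category by scanning the items; the overall counters are derived from the table.
--     items = list(results.items())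
--     categories = []
--     for obj_id, _ in items:
--         c = obj_id.split('/')[0]
--         if c not in categories:
--             categories.append(c)
--     stats_by_category = {}
--     for c in categories:
--         group = [r for oid, r in items if oid.split('/')[0] == c]
--         appropriate = sum(1 for r in group if r.get("is_appropriate", False))
--         stats_by_category[c] = {
--             "total": len(group),
--             "appropriate": appropriate,
--             "inappropriate": len(group) - appropriate,
--         }
--     total_objects = len(items)
--     appropriate_objects = sum(st["appropriate"] for st in stats_by_category.values())
--     return total_objects, appropriate_objects, total_objects - appropriate_objects, stats_by_category
-- ===== Notes on version B (the rewrite author's own statement) =====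
-- stated objective: alternative
-- what changed: B replaces A's single-pass dict accumulation (counting comprehension plus a loop mutating nested per-category dicts) by a staged group-by: first a dedup pass collecting the categories in first-seen order, then one filtering scan of the items per category to build each stats entry, with the overall counters summed from the finished table.
import Mathlib
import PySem

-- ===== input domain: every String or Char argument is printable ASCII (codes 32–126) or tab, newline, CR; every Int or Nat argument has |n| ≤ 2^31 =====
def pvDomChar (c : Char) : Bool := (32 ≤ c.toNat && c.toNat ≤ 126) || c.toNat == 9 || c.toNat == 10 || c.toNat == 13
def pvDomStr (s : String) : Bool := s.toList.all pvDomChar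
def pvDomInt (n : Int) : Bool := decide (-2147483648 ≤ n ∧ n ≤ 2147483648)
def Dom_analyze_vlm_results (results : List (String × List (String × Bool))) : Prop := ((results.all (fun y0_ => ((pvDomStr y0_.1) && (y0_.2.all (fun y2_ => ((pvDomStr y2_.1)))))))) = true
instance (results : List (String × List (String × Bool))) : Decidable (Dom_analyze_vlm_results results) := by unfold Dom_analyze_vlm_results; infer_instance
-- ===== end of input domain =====

-- B replaces A's one-pass nested-dict accumulation by a staged group-by: a dedup pass collecting
-- categories in first-seen order, then one filtering scan per category; overall counters come
-- from the finished table (alternative decomposition, not claimed faster).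

-- obj_id.split('/')[0] : split with a non-empty separator always yields a non-empty list, so [0] is its head
def pvCat (obj_id : String) : String := (((PySem.Str.split? obj_id "/").getD []).headD "")

-- result.get("is_appropriate", False)
def pvIsApp (result : List (String × Bool)) : Bool := (PySem.Dict.mk result).getD "is_appropriate" false

-- ===== PORT A =====
def pvStatsStepA (st : PySem.Dict String (PySem.Dict String Int)) (p : String × List (String × Bool)) :
    PySem.Dict String (PySem.Dict String Int) :=
  let category := pvCat p.1
  let st := if st.contains category then st
            else st.insert category (PySem.Dict.mk [("total", (0:Int)), ("appropriate", 0), ("inappropriate", 0)])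
  let st := st.modify category (PySem.Dict.mk []) (fun d => d.modify "total" 0 (· + 1))
  if pvIsApp p.2 then st.modify category (PySem.Dict.mk []) (fun d => d.modify "appropriate" 0 (· + 1))
  else st.modify category (PySem.Dict.mk []) (fun d => d.modify "inappropriate" 0 (· + 1))

def analyze_vlm_results (results : List (String × List (String × Bool))) :
    Int × Int × Int × (List (String × List (String × Int))) :=
  let total_objects : Int := results.length
  let appropriate_objects : Int := results.foldl (fun acc p => if pvIsApp p.2 then acc + 1 else acc) 0
  let inappropriate_objects := total_objects - appropriate_objects
  let stats_by_category := results.foldl pvStatsStepA PySem.Dict.empty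
  (total_objects, appropriate_objects, inappropriate_objects,
    stats_by_category.items.map (fun q => (q.1, q.2.items)))

-- ===== PORT B =====
-- pass 1: categories in first-seen order
def pvCatsStep (cs : List String) (p : String × List (String × Bool)) : List String :=
  let c := pvCat p.1
  if c ∈ cs then cs else cs ++ [c]

def pvCats (results : List (String × List (String × Bool))) : List String :=
  results.foldl pvCatsStep []

-- pass 2 (per category): filter the group, count its appropriates, build the stats entry
def pvCatStats (results : List (String × List (String × Bool))) (c : String) : List (String × Int) :=
  let group := results.filter (fun p => pvCat p.1 == c)
  let appropriate : Int := (group.countP (fun p => pvIsApp p.2) : Int)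
  [("total", (group.length : Int)), ("appropriate", appropriate),
   ("inappropriate", (group.length : Int) - appropriate)]

def analyze_vlm_results_alt (results : List (String × List (String × Bool))) :
    Int × Int × Int × (List (String × List (String × Int))) :=
  let stats_by_category := (pvCats results).map (fun c => (c, pvCatStats results c))
  let total_objects : Int := results.length
  let appropriate_objects : Int :=
    (stats_by_category.map (fun q => (PySem.Dict.mk q.2).getD "appropriate" 0)).sum
  (total_objects, appropriate_objects, total_objects - appropriate_objects, stats_by_category)

-- ===== PRECONDITION & SPEC =====
def Spec_analyze_vlm_results (results : List (String × List (String × Bool))) (out : Int × Int × Int × (List (String × List (String × Int)))) : Prop := out = analyze_vlm_results_alt results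
instance (results : List (String × List (String × Bool))) (out : Int × Int × Int × (List (String × List (String × Int)))) : Decidable (Spec_analyze_vlm_results results out) := by
  unfold Spec_analyze_vlm_results
  letI i0 : DecidableEq (List (String × List (String × Int))) := instDecidableEqList
  letI i1 : DecidableEq (Int × List (String × List (String × Int))) := instDecidableEqProd
  letI i2 : DecidableEq (Int × Int × List (String × List (String × Int))) := instDecidableEqProd
  exact instDecidableEqProd out (analyze_vlm_results_alt results)

-- ===== CLAIM (what is proved, stated in full; the proofs are below) =====
def Claim_equal_analyze_vlm_results : Prop := ∀ (results : List (String × List (String × Bool))), Dom_analyze_vlm_results results → Spec_analyze_vlm_results results (analyze_vlm_results results)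

-- ===== LEMMAS AND PROOFS =====

-- category counts of a prefix, as A's per-category dict value
def pvCnt (l : List (String × List (String × Bool))) (c : String) : Nat × Nat :=
  (l.countP (fun p => pvCat p.1 == c),
   l.countP (fun p => pvCat p.1 == c && pvIsApp p.2))

def pvRenderVal (t a : Nat) : PySem.Dict String Int :=
  PySem.Dict.mk [("total", (t : Int)), ("appropriate", (a : Int)), ("inappropriate", (t : Int) - (a : Int))]

lemma pv_cats_append (l : List (String × List (String × Bool))) (p : String × List (String × Bool)) :
    pvCats (l ++ [p]) = pvCatsStep (pvCats l) p := by
  simp [pvCats, List.foldl_append]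

lemma pv_cats_sub (l : List (String × List (String × Bool))) :
    ∀ (acc : List String),
      (∀ x ∈ acc, x ∈ l.foldl pvCatsStep acc) ∧
      (∀ p ∈ l, pvCat p.1 ∈ l.foldl pvCatsStep acc) := by
  induction l with
  | nil => intro acc; simp
  | cons q rest ih =>
    intro acc
    obtain ⟨h1, h2⟩ := ih (pvCatsStep acc q)
    refine ⟨?_, ?_⟩
    · intro x hx
      apply h1
      simp only [pvCatsStep]
      split <;> simp [hx]
    · intro p hp
      rcases List.mem_cons.mp hp with hp | hp
      · subst hp
        apply h1
        simp only [pvCatsStep]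
        split
        · assumption
        · simp
      · exact h2 p hp

lemma pv_cats_nodup (l : List (String × List (String × Bool))) :
    ∀ (acc : List String), acc.Nodup → (l.foldl pvCatsStep acc).Nodup := by
  induction l with
  | nil => intro acc h; simpa using h
  | cons q rest ih =>
    intro acc h
    apply ih
    simp only [pvCatsStep]
    by_cases hm : pvCat q.1 ∈ acc
    · simpa [hm] using h
    · rw [if_neg hm]
      refine List.Nodup.append h (List.nodup_singleton _) ?_
      intro a ha hb
      rw [List.mem_singleton] at hb
      exact hm (hb ▸ ha)

lemma pv_cnt_not_mem (l : List (String × List (String × Bool))) (c : String)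
    (h : c ∉ pvCats l) : pvCnt l c = (0, 0) := by
  have hz : l.countP (fun p => pvCat p.1 == c) = 0 := by
    rw [List.countP_eq_zero]
    intro p hp hpc
    have hcc : pvCat p.1 = c := by simpa using hpc
    have hmem : pvCat p.1 ∈ pvCats l := (pv_cats_sub l []).2 p hp
    exact h (hcc ▸ hmem)
  have hz2 : l.countP (fun p => pvCat p.1 == c && pvIsApp p.2) = 0 := by
    rw [List.countP_eq_zero]
    intro p hp hpc
    simp only [Bool.and_eq_true] at hpc
    have := List.countP_eq_zero.mp hz p hp
    exact this hpc.1
  simp [pvCnt, hz, hz2]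

-- get? of a dict whose items are keyed by the list itself
lemma pv_get?_keyed {V : Type} (cs : List String) (g : String → V) (k : String) :
    (PySem.Dict.mk (cs.map (fun c => (c, g c)))).get? k
      = if k ∈ cs then some (g k) else none := by
  induction cs with
  | nil => simp [PySem.Dict.get?]
  | cons c rest ih =>
    rw [List.map_cons, PySem.Dict.get?_mk_cons]
    by_cases h : c = k
    · subst h; simp
    · have hb : (c == k) = false := by simp [h]
      simp [hb, ih, show k ≠ c from fun he => h he.symm]

lemma pv_nest_true (t a : Nat) :
    ((pvRenderVal t a).modify "total" 0 (· + 1)).modify "appropriate" 0 (· + 1)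
      = pvRenderVal (t + 1) (a + 1) := by
  apply PySem.Dict.ext
  simp [pvRenderVal, PySem.Dict.modify, PySem.Dict.insert, PySem.Dict.getD, PySem.Dict.get?,
        PySem.Dict.contains, List.find?]

lemma pv_nest_false (t a : Nat) :
    ((pvRenderVal t a).modify "total" 0 (· + 1)).modify "inappropriate" 0 (· + 1)
      = pvRenderVal (t + 1) a := by
  apply PySem.Dict.ext
  simp [pvRenderVal, PySem.Dict.modify, PySem.Dict.insert, PySem.Dict.getD, PySem.Dict.get?,
        PySem.Dict.contains, List.find?]
  ring

lemma pv_modify_modify (st : PySem.Dict String (PySem.Dict String Int)) (cat : String)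
    (D : PySem.Dict String Int) (h : st.get? cat = some D)
    (g1 g2 : PySem.Dict String Int → PySem.Dict String Int) :
    (st.modify cat (PySem.Dict.mk []) g1).modify cat (PySem.Dict.mk []) g2
      = st.insert cat (g2 (g1 D)) := by
  show (st.insert cat (g1 (st.getD cat (PySem.Dict.mk [])))).insert cat
        (g2 ((st.insert cat (g1 (st.getD cat (PySem.Dict.mk [])))).getD cat (PySem.Dict.mk [])))
      = st.insert cat (g2 (g1 D))
  rw [PySem.Dict.getD_insert_self, PySem.Dict.insert_insert_self,
      show st.getD cat (PySem.Dict.mk []) = D from by rw [PySem.Dict.getD_eq_get?_getD, h]; rfl]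

lemma pv_cnt_append (l : List (String × List (String × Bool))) (p : String × List (String × Bool))
    (c : String) :
    pvCnt (l ++ [p]) c
      = if pvCat p.1 = c
        then ((pvCnt l c).1 + 1, (pvCnt l c).2 + if pvIsApp p.2 then 1 else 0)
        else pvCnt l c := by
  simp only [pvCnt, List.countP_append, List.countP_cons, List.countP_nil]
  by_cases h : pvCat p.1 = c <;> by_cases h2 : pvIsApp p.2 = true <;> simp [h, h2]

-- one step of A preserves the characterization by counts over the processed prefix
lemma pv_step (l : List (String × List (String × Bool))) (p : String × List (String × Bool))
    (st : PySem.Dict String (PySem.Dict String Int))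
    (hC : st.items = (pvCats l).map (fun c => (c, pvRenderVal (pvCnt l c).1 (pvCnt l c).2))) :
    (pvStatsStepA st p).items
      = (pvCats (l ++ [p])).map (fun c => (c, pvRenderVal (pvCnt (l ++ [p]) c).1 (pvCnt (l ++ [p]) c).2)) := by
  have hst : st = PySem.Dict.mk ((pvCats l).map (fun c => (c, pvRenderVal (pvCnt l c).1 (pvCnt l c).2))) :=
    PySem.Dict.ext hC
  have hkeys : st.contains (pvCat p.1) = decide (pvCat p.1 ∈ pvCats l) := by
    rw [PySem.Dict.contains_eq_decide_mem_keys]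
    congr 1
    simp [PySem.Dict.keys, hC, List.map_map, Function.comp_def]
  rw [pv_cats_append]
  by_cases hmem : pvCat p.1 ∈ pvCats l
  · -- existing category: A overwrites in place, counts bump at the key
    have hcont : st.contains (pvCat p.1) = true := by rw [hkeys]; simpa using hmem
    have hg : st.get? (pvCat p.1) = some (pvRenderVal (pvCnt l (pvCat p.1)).1 (pvCnt l (pvCat p.1)).2) := by
      rw [hst, pv_get?_keyed, if_pos hmem]
    have hA : pvStatsStepA st p
        = st.insert (pvCat p.1)
            (pvRenderVal ((pvCnt l (pvCat p.1)).1 + 1)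
              ((pvCnt l (pvCat p.1)).2 + if pvIsApp p.2 then 1 else 0)) := by
      simp only [pvStatsStepA, hcont, if_true]
      by_cases h2 : pvIsApp p.2 = true
      · rw [if_pos h2, pv_modify_modify st _ _ hg, pv_nest_true]
        simp [h2]
      · rw [if_neg h2, pv_modify_modify st _ _ hg, pv_nest_false]
        simp [h2]
    rw [hA, PySem.Dict.items_insert_of_contains _ _ hcont, hC, List.map_map,
        pvCatsStep, if_pos hmem]
    apply List.map_congr_left
    intro c _
    rw [pv_cnt_append]
    by_cases h : pvCat p.1 = c
    · subst h
      simp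
    · have hne : ¬ c = pvCat p.1 := fun he => h he.symm
      simp [hne, h]
  · -- fresh category: A appends an initialized entry, counts there were zero
    have hcont : st.contains (pvCat p.1) = false := by rw [hkeys]; simpa using hmem
    have hinit : PySem.Dict.mk [("total", (0:Int)), ("appropriate", 0), ("inappropriate", 0)]
        = pvRenderVal 0 0 := by
      apply PySem.Dict.ext
      simp [pvRenderVal]
    have hg : (st.insert (pvCat p.1) (pvRenderVal 0 0)).get? (pvCat p.1) = some (pvRenderVal 0 0) :=
      PySem.Dict.get?_insert_self _ _ _
    have hA : pvStatsStepA st p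
        = st.insert (pvCat p.1) (pvRenderVal 1 (if pvIsApp p.2 then 1 else 0)) := by
      simp only [pvStatsStepA, hcont, Bool.false_eq_true, if_false, hinit]
      by_cases h2 : pvIsApp p.2 = true
      · rw [if_pos h2, pv_modify_modify _ _ _ hg, pv_nest_true, PySem.Dict.insert_insert_self,
            if_pos h2]
      · rw [if_neg h2, pv_modify_modify _ _ _ hg, pv_nest_false, PySem.Dict.insert_insert_self,
            if_neg h2]
    have hz : pvCnt l (pvCat p.1) = (0, 0) := pv_cnt_not_mem l _ hmem
    rw [hA, PySem.Dict.items_insert_of_not_contains _ _ hcont, hC, pvCatsStep, if_neg hmem,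
        List.map_append]
    congr 1
    · apply List.map_congr_left
      intro c hc
      rw [pv_cnt_append, if_neg]
      intro he
      exact hmem (he ▸ hc)
    · simp [pv_cnt_append, hz]

lemma pv_char (l : List (String × List (String × Bool))) :
    (l.foldl pvStatsStepA PySem.Dict.empty).items
      = (pvCats l).map (fun c => (c, pvRenderVal (pvCnt l c).1 (pvCnt l c).2)) := by
  induction l using List.reverseRecOn with
  | nil => simp [pvCats, PySem.Dict.empty]
  | append_singleton l p ih =>
    rw [List.foldl_append, List.foldl_cons, List.foldl_nil]
    exact pv_step l p _ ih

lemma pv_sum_indicator (cs : List String) (c0 : String) (x : Int)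
    (hnd : cs.Nodup) (hmem : c0 ∈ cs) :
    (cs.map (fun c => if c0 = c then x else 0)).sum = x := by
  induction cs with
  | nil => simp at hmem
  | cons c rest ih =>
    simp only [List.nodup_cons] at hnd
    rcases List.mem_cons.mp hmem with h | h
    · have hz : ∀ d ∈ rest, (if c0 = d then x else 0) = (fun _ => (0:Int)) d := by
        intro d hd
        rw [if_neg]
        intro he
        rw [h] at he
        exact hnd.1 (he ▸ hd)
      rw [List.map_cons, List.sum_cons, List.map_congr_left hz, if_pos h]
      simp
    · have hne : c0 ≠ c := by intro he; exact hnd.1 (he ▸ h)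
      simp [hne, ih hnd.2 h]

lemma pv_sum_app (l : List (String × List (String × Bool))) (cs : List String)
    (hnd : cs.Nodup) (hcov : ∀ p ∈ l, pvCat p.1 ∈ cs) :
    (cs.map (fun c => ((pvCnt l c).2 : Int))).sum = (l.countP (fun p => pvIsApp p.2) : Int) := by
  induction l with
  | nil => simp [pvCnt]
  | cons q rest ih =>
    have hcov' : ∀ p ∈ rest, pvCat p.1 ∈ cs := fun p hp => hcov p (List.mem_cons_of_mem _ hp)
    have hsplit : ∀ c, ((pvCnt (q :: rest) c).2 : Int)
        = ((pvCnt rest c).2 : Int) + (if pvCat q.1 = c ∧ pvIsApp q.2 = true then 1 else 0) := by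
      intro c
      simp only [pvCnt, List.countP_cons]
      by_cases h1 : pvCat q.1 = c
      · by_cases h2 : pvIsApp q.2 = true
        · simp [h1, h2]
        · simp [h1, h2]
      · simp [h1]
    have : (cs.map (fun c => ((pvCnt (q :: rest) c).2 : Int))).sum
        = (cs.map (fun c => ((pvCnt rest c).2 : Int))).sum
          + (cs.map (fun c => if pvCat q.1 = c ∧ pvIsApp q.2 = true then 1 else 0)).sum := by
      rw [← List.sum_map_add]
      exact List.map_congr_left (fun c _ => hsplit c) ▸ rfl
    rw [this, ih hcov', List.countP_cons]
    by_cases h2 : pvIsApp q.2 = true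
    · have hone : (cs.map (fun c => if pvCat q.1 = c ∧ pvIsApp q.2 = true then (1:Int) else 0)).sum = 1 := by
        have he : ∀ c ∈ cs, (if pvCat q.1 = c ∧ pvIsApp q.2 = true then (1:Int) else 0)
            = (if pvCat q.1 = c then (1:Int) else 0) := by
          intro c _; by_cases h : pvCat q.1 = c <;> simp [h, h2]
        rw [List.map_congr_left he]
        exact pv_sum_indicator cs (pvCat q.1) 1 hnd (hcov q (by simp))
      rw [hone]
      push_cast [h2]
      norm_num
    · have hzero : (cs.map (fun c => if pvCat q.1 = c ∧ pvIsApp q.2 = true then (1:Int) else 0)).sum = 0 := by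
        have he : ∀ c ∈ cs, (if pvCat q.1 = c ∧ pvIsApp q.2 = true then (1:Int) else 0) = (fun _ => (0:Int)) c := by
          intro c _; simp [h2]
        rw [List.map_congr_left he]
        simp
      rw [hzero]
      simp [h2]

lemma pv_fold_count (l : List (String × List (String × Bool))) :
    ∀ (a : Int),
    l.foldl (fun acc p => if pvIsApp p.2 then acc + 1 else acc) a
      = a + ((l.countP (fun p => pvIsApp p.2) : Nat) : Int) := by
  induction l with
  | nil => intro a; simp
  | cons p rest ih =>
    intro a
    rw [List.foldl_cons, List.countP_cons, ih]
    by_cases h : pvIsApp p.2 = true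
    · simp [h]
      ring
    · simp [h]

-- ===== VERDICT (by name: the statement is the Claim_ definition above) =====
theorem analyze_vlm_results_spec : Claim_equal_analyze_vlm_results := by
  intro results _
  unfold Spec_analyze_vlm_results
  simp only [analyze_vlm_results, analyze_vlm_results_alt]
  have hnd : (pvCats results).Nodup := pv_cats_nodup results [] (by simp)
  have hcov : ∀ p ∈ results, pvCat p.1 ∈ pvCats results :=
    fun p hp => (pv_cats_sub results []).2 p hp
  have hentry : ∀ c, pvCatStats results c
      = [("total", ((pvCnt results c).1 : Int)), ("appropriate", ((pvCnt results c).2 : Int)),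
         ("inappropriate", ((pvCnt results c).1 : Int) - ((pvCnt results c).2 : Int))] := by
    intro c
    have h1 : (results.filter (fun p => pvCat p.1 == c)).length = (pvCnt results c).1 := by
      simp [pvCnt, ← List.countP_eq_length_filter]
    have h2 : (results.filter (fun p => pvCat p.1 == c)).countP (fun p => pvIsApp p.2)
        = (pvCnt results c).2 := by
      rw [List.countP_filter]
      simp only [pvCnt]
      congr 1
      funext p
      rw [Bool.and_comm]
    simp [pvCatStats, h1, h2]
  have hstats : (results.foldl pvStatsStepA PySem.Dict.empty).items.map (fun q => (q.1, q.2.items))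
      = (pvCats results).map (fun c => (c, pvCatStats results c)) := by
    rw [pv_char, List.map_map]
    apply List.map_congr_left
    intro c _
    simp [Function.comp, pvRenderVal, hentry c]
  have happget : ∀ c, (PySem.Dict.mk (pvCatStats results c)).getD "appropriate" 0
      = ((pvCnt results c).2 : Int) := by
    intro c
    rw [hentry c]
    simp [PySem.Dict.getD, PySem.Dict.get?]
  have happ : results.foldl (fun acc p => if pvIsApp p.2 then acc + 1 else acc) 0
      = (((pvCats results).map (fun c => (c, pvCatStats results c))).map
          (fun q => (PySem.Dict.mk q.2).getD "appropriate" 0)).sum := by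
    rw [pv_fold_count, List.map_map]
    simp only [Function.comp_def]
    have : ((pvCats results).map (fun c => (PySem.Dict.mk (pvCatStats results c)).getD "appropriate" 0)).sum
        = ((pvCats results).map (fun c => ((pvCnt results c).2 : Int))).sum := by
      congr 1
      exact List.map_congr_left (fun c _ => happget c)
    rw [this, pv_sum_app results (pvCats results) hnd hcov]
    ring
  rw [happ, hstats]
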